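-- pv_equiv track=rewrite | github.com/shrapp/thermal_tfim | for_emanuele_3_7_25.py | count_kinks
-- ===== SOURCE A (Python) =====
-- def count_kinks(bitstring: str) -> int:
--     """Count the number of kinks in a quantum state string (PBC)."""
--     count = 0
--     n = len(bitstring)
--     if n == 0:  # Handle empty string case
--         return 0
--     for i in range(n):  # Loop from 0 to N-1
--         j = (i + 1) % n  # Use modulo for periodic boundary
--         # if j < i: continue # TODO: remove, this is for OPC
--         if bitstring[i] != bitstring[j]:
--             count += 1
--     return count
-- ===== SOURCE B (Python) =====
-- def count_kinks(bitstring: str) -> int: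
--     """Count kinks (PBC) by divide and conquer: boundaries within each half
--     plus the junction, then one wrap-around check."""
--     if not bitstring:
--         return 0
--
--     def lin(lo: int, hi: int) -> int:
--         # boundaries strictly inside bitstring[lo:hi]
--         if hi - lo < 2:
--             return 0
--         mid = (lo + hi) // 2
--         return lin(lo, mid) + lin(mid, hi) + (bitstring[mid - 1] != bitstring[mid])
--
--     return lin(0, len(bitstring)) + (bitstring[-1] != bitstring[0])
-- ===== Notes on version B (the rewrite author's own statement) =====
-- stated objective: alternative
-- what changed: Replaces the linear loop with modulo wrap-around by a divide-and-conquer recursion: boundaries inside an interval = boundaries in each half plus one junction comparison, with a single explicit wrap-around check at the end.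
import Mathlib
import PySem

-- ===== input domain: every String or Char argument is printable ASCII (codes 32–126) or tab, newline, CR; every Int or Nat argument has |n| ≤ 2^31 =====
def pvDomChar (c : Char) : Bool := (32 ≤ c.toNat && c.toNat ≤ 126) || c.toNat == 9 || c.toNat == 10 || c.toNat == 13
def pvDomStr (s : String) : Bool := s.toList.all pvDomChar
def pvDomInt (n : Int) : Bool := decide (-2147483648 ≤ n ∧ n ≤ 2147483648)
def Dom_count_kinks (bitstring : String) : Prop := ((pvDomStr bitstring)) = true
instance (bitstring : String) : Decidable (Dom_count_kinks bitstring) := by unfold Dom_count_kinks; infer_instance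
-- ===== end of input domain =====

-- B counts the boundaries by divide and conquer (each half plus the junction) instead of
-- one modular-index loop; same values, a genuinely different decomposition, same O(n) cost.

-- ===== PORT A =====
def count_kinks (bitstring : String) : Int :=
  let count : Int := 0
  let n : Int := PySem.Str.len bitstring
  if n = 0 then 0
  else
    (PySem.List.pyRange 0 n 1).foldl (fun count i =>
      let j := PySem.Int.mod (i + 1) n
      if PySem.Str.pyGet? bitstring i ≠ PySem.Str.pyGet? bitstring j then count + 1
      else count) count

-- ===== PORT B =====
-- Source B's inner 'lin(lo, hi)'; lo/hi are the nonnegative slice indices of the recursion, so Nat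
-- division (lo+hi)/2 is exactly Python's (lo+hi)//2 and w[...]? is exactly bitstring[...] here.
def pvLin (w : List Char) (lo hi : Nat) : Int :=
  if hi - lo < 2 then 0
  else
    let mid := (lo + hi) / 2
    pvLin w lo mid + pvLin w mid hi +
      (if w[mid - 1]? ≠ w[mid]? then 1 else 0)
termination_by hi - lo
decreasing_by all_goals omega

def count_kinks_alt (bitstring : String) : Int :=
  if bitstring.toList.isEmpty then 0
  else
    pvLin bitstring.toList 0 bitstring.toList.length +
      (if PySem.Str.pyGet? bitstring (-1) ≠ PySem.Str.pyGet? bitstring 0 then 1 else 0)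

-- ===== PRECONDITION & SPEC =====
def Spec_count_kinks (bitstring : String) (out : Int) : Prop := out = count_kinks_alt bitstring
instance (bitstring : String) (out : Int) : Decidable (Spec_count_kinks bitstring out) := by unfold Spec_count_kinks; infer_instance

-- ===== CLAIM (what is proved, stated in full; the proofs are below) =====
def Claim_equal_count_kinks : Prop := ∀ (bitstring : String), Dom_count_kinks bitstring → Spec_count_kinks bitstring (count_kinks bitstring)

-- ===== LEMMAS AND PROOFS =====

-- pvLin computes the number of differing adjacent pairs inside the interval [lo, hi)
theorem pvLin_eq : ∀ (d lo hi : Nat) (w : List Char), hi - lo = d → hi ≤ w.length →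
    pvLin w lo hi
      = ((((w.zip w.tail).drop lo).take (hi - 1 - lo)).countP (fun p => decide (p.1 ≠ p.2)) : Int) := by
  intro d
  induction d using Nat.strong_induction_on with
  | _ d ih =>
    intro lo hi w hd hle
    rw [pvLin]
    by_cases hsmall : hi - lo < 2
    · have : hi - 1 - lo = 0 := by omega
      simp [hsmall, this]
    · simp only [hsmall, if_false]
      have h2 : lo + 2 ≤ hi := by omega
      set mid := (lo + hi) / 2 with hmid
      have hlo : lo < mid := by omega
      have hhi : mid < hi := by omega
      rw [ih (mid - lo) (by omega) lo mid w rfl (by omega),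
          ih (hi - mid) (by omega) mid hi w rfl hle]
      set z := w.zip w.tail with hz
      -- split the segment [lo, hi-1) at mid-1 and mid
      have hseg : (z.drop lo).take (hi - 1 - lo)
          = (z.drop lo).take (mid - 1 - lo) ++ ((z.drop (mid - 1)).take 1
            ++ (z.drop mid).take (hi - 1 - mid)) := by
        have e1 : hi - 1 - lo = (mid - 1 - lo) + (1 + (hi - 1 - mid)) := by omega
        rw [e1, List.take_add]
        have d1 : (z.drop lo).drop (mid - 1 - lo) = z.drop (mid - 1) := by
          rw [List.drop_drop]; congr 1; omega
        rw [d1, List.take_add]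
        have d2 : (z.drop (mid - 1)).drop 1 = z.drop mid := by
          rw [List.drop_drop]; congr 1; omega
        rw [d2]
      have hzlen' : z.length = w.length - 1 := by
        rw [hz, List.length_zip, List.length_tail]; omega
      have hmlt : mid - 1 < z.length := by omega
      have hone : (z.drop (mid - 1)).take 1 = [z[mid - 1]] := by
        rw [List.take_one, List.head?_drop, List.getElem?_eq_getElem hmlt]
        rfl
      have hpair : z[mid - 1] = (w[mid - 1]'(by omega), w[mid]'(by omega)) := by
        simp [hz, List.getElem_zip, List.getElem_tail]
        congr 1 <;> omega
      rw [hseg, List.countP_append, hone, List.countP_append]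
      have hg1 : w[mid - 1]? = some (w[mid - 1]'(by omega)) := List.getElem?_eq_getElem _
      have hg2 : w[mid]? = some (w[mid]'(by omega)) := List.getElem?_eq_getElem _
      rw [hg1, hg2, hpair]
      by_cases hne : w[mid - 1]'(by omega) = w[mid]'(by omega) <;>
        simp [hne] <;> push_cast <;> ring

-- A's fold over range(0, k) counts differing pairs among the first k adjacent pairs
theorem fold_take : ∀ (k : Nat) (w : List Char) (acc : Int), k + 1 ≤ w.length →
    (PySem.List.pyRange 0 (k : Int) 1).foldl
      (fun acc i => if PySem.List.pyGet? w i ≠ PySem.List.pyGet? w (i + 1) then acc + 1 else acc) acc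
    = acc + (((w.zip w.tail).take k).countP (fun p => decide (p.1 ≠ p.2)) : Int) := by
  intro k
  induction k with
  | zero => intro w acc h; simp [PySem.List.pyRange_zero_nat]
  | succ k ih =>
    intro w acc h
    have hk : ((k : Int) + 1) = ((k + 1 : Nat) : Int) := by push_cast; ring
    rw [← hk, PySem.List.pyRange_one_succ_right (by positivity), List.foldl_append,
        ih w acc (by omega)]
    have hzlen : k < (w.zip w.tail).length := by
      simp [List.length_zip]; omega
    have htake : (w.zip w.tail).take (k + 1) = (w.zip w.tail).take k ++ [(w.zip w.tail)[k]] := by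
      rw [List.take_add_one]
      simp [List.getElem?_eq_getElem hzlen]
    have hz : (w.zip w.tail)[k] = (w[k]'(by omega), w[k + 1]'(by omega)) := by
      simp [List.getElem_zip, List.getElem_tail]
    have hg1 : PySem.List.pyGet? w (k : Int) = some (w[k]'(by omega)) := by
      rw [PySem.List.pyGet?_natCast]; simp
    have hg2 : PySem.List.pyGet? w ((k : Int) + 1) = some (w[k + 1]'(by omega)) := by
      rw [hk, PySem.List.pyGet?_natCast]; simp
    rw [htake, List.countP_append]
    simp only [List.foldl_cons, List.foldl_nil, hg1, hg2, hz, List.countP_singleton]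
    by_cases hne : w[k]'(by omega) = w[k + 1]'(by omega) <;> simp [hne] <;> push_cast <;> ring

theorem mod_small (a b : Int) (h0 : 0 ≤ a) (h1 : a < b) : PySem.Int.mod a b = a := by
  simp [PySem.Int.mod]
  rw [Int.fmod_eq_emod, if_pos (Or.inl (by omega : (0:Int) ≤ b))]
  rw [Int.emod_eq_of_lt h0 h1]; ring

theorem mod_self (b : Int) : PySem.Int.mod b b = 0 := by
  simp [PySem.Int.mod, Int.fmod_self]

theorem count_list (w : List Char) :
    (if (w.length : Int) = 0 then (0 : Int)
     else
       (PySem.List.pyRange 0 (w.length : Int) 1).foldl (fun count i =>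
         if PySem.List.pyGet? w i ≠ PySem.List.pyGet? w (PySem.Int.mod (i + 1) (w.length : Int))
         then count + 1 else count) 0)
    = (if w.isEmpty then (0 : Int)
       else pvLin w 0 w.length +
         (if PySem.List.pyGet? w (-1) ≠ PySem.List.pyGet? w 0 then 1 else 0)) := by
  by_cases hwne : w = []
  · subst hwne; simp
  · have hlen : 1 ≤ w.length := by
      cases w with | nil => simp at hwne | cons c t => simp
    have hne0 : ((w.length : Int)) ≠ 0 := by simp; omega
    simp only [hne0, if_false, List.isEmpty_eq_false_iff.mpr hwne, Bool.false_eq_true]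
    have hsplit : PySem.List.pyRange 0 ((w.length : Int)) 1
        = PySem.List.pyRange 0 ((w.length : Int) - 1) 1 ++ [(w.length : Int) - 1] := by
      have h := PySem.List.pyRange_one_succ_right (a := 0) (b := (w.length : Int) - 1) (by omega)
      have h2 : (w.length : Int) - 1 + 1 = (w.length : Int) := by ring
      rw [h2] at h
      exact h
    rw [hsplit, List.foldl_append]
    have hcongr := PySem.List.foldl_congr_mem
      (l := PySem.List.pyRange 0 ((w.length : Int) - 1) 1) (init := (0 : Int))
      (f := fun count i =>
        if PySem.List.pyGet? w i ≠ PySem.List.pyGet? w (PySem.Int.mod (i + 1) (w.length : Int))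
        then count + 1 else count)
      (g := fun count i =>
        if PySem.List.pyGet? w i ≠ PySem.List.pyGet? w (i + 1) then count + 1 else count)
      (by
        intro acc x hx
        rw [PySem.List.mem_pyRange_one] at hx
        simp only [mod_small (x + 1) (w.length : Int) (by omega) (by omega)])
    rw [hcongr]
    have hcast : ((w.length : Int) - 1) = ((w.length - 1 : Nat) : Int) := by omega
    rw [hcast, fold_take (w.length - 1) w 0 (by omega)]
    -- B's side
    rw [pvLin_eq (w.length - 0) 0 w.length w (by omega) (le_refl _)]
    simp only [List.drop_zero]
    -- wrap-around step
    have hidx : w.length - 1 < w.length := by omega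
    have hgl : PySem.List.pyGet? w ((w.length - 1 : Nat) : Int) = some (w[w.length - 1]'hidx) := by
      rw [PySem.List.pyGet?_natCast]
      simp [List.getElem?_eq_getElem hidx]
    have hg0 : PySem.List.pyGet? w (0 : Int) = some (w[0]'(by omega)) := by
      have h0 : ((0 : Nat) : Int) = (0 : Int) := rfl
      rw [← h0, PySem.List.pyGet?_natCast]
      simp [List.getElem?_eq_getElem (show 0 < w.length by omega)]
    have hgneg : PySem.List.pyGet? w (-1) = some (w[w.length - 1]'hidx) := by
      rw [PySem.List.pyGet?_neg_one]
      rw [List.getLast?_eq_getElem?]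
      simp [List.getElem?_eq_getElem hidx]
    have hmodn : PySem.Int.mod (((w.length - 1 : Nat) : Int) + 1) (w.length : Int) = 0 := by
      have h3 : (((w.length - 1 : Nat) : Int) + 1) = (w.length : Int) := by omega
      rw [h3]
      exact mod_self _
    simp only [List.foldl_cons, List.foldl_nil, hmodn, hgl, hg0, hgneg]
    by_cases hce : w[w.length - 1]'hidx = w[0]'(by omega)
    · simp [hce]
    · simp [hce, Ne.symm hce]

-- ===== VERDICT (by name: the statement is the Claim_ definition above) =====
theorem count_kinks_spec : Claim_equal_count_kinks := by
  intro s _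
  unfold Spec_count_kinks count_kinks count_kinks_alt
  simp only [PySem.Str.pyGet?, PySem.Chars.pyGet?]
  have hlen' : PySem.Str.len s = (s.toList.length : Int) := by simp [PySem.Str.len_eq]
  rw [hlen']
  exact count_list s.toList
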